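-- pv_equiv track=rewrite | github.com/gruber-sciencelab/MAPP | modules/CREATE_SITECOUNT_MATRICES/scripts/create-kmers-sitecount-matrix.py | count_without_overlaps
-- ===== SOURCE A (Python) =====
-- def count_without_overlaps(seq, sub):
--     """
--     Generator function to count non-overlapping
--     occurances of a sub-string in a string.
--     Returns a list of positions at which the substring match starts.
--     """
--     start = 0
--     while True:
--         start = seq.find(sub, start)
--         if start == -1:
--             return
--         yield start
--         start += len(sub)  # use start += 1 to find overlapping matches
-- ===== SOURCE B (Python) =====
-- def count_without_overlaps(seq, sub):
--     """
--     Generator yielding start positions of non-overlapping matches of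
--     sub in seq: stage 1 enumerates ALL (overlapping) match positions,
--     stage 2 greedily selects the non-overlapping ones with a bound cursor.
--     """
--     m = len(sub)
--     hits = [i for i in range(len(seq) - m + 1) if seq[i:i + m] == sub]
--     bound = 0
--     for i in hits:
--         if i >= bound:
--             yield i
--             bound = i + m
-- ===== Notes on version B (the rewrite author's own statement) =====
-- stated objective: alternative
-- what changed: Replaced A's single find-driven cursor (jump to the next match, skip its length) with a two-stage algorithm: first enumerate ALL overlapping match positions with a range comprehension, then a separate greedy pass with a bound cursor selects the non-overlapping ones.
import Mathlib
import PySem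

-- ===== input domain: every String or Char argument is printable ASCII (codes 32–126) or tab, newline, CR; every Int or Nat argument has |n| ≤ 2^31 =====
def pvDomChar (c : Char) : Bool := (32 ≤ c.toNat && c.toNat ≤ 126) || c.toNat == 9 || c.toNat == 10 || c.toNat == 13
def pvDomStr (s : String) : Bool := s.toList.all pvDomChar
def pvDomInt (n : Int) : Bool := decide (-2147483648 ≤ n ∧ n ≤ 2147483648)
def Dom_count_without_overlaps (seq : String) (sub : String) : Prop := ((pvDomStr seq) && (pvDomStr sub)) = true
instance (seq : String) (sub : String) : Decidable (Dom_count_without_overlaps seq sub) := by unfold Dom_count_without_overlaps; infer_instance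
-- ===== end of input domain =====

-- B replaces A's find-driven cursor with a two-stage algorithm: enumerate all overlapping match positions, then greedily select non-overlapping ones (alternative decomposition, same cost).


-- ===== PORT A =====
-- the 'while True' loop; fuel only makes the recursion total (with sub ≠ '' it never runs out)
def pvGoA (s p : List Char) (start : Nat) : Nat → List Int
  | 0 => []
  | fuel + 1 =>
    let f := PySem.Chars.findFrom s p (start : Int) none
    if f = -1 then []
    else f :: pvGoA s p (f.toNat + p.length) fuel

def count_without_overlaps (seq : String) (sub : String) : List Int :=
  pvGoA seq.toList sub.toList 0 (seq.toList.length + 1)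

-- ===== PORT B =====
-- stage 1 of Source B: the comprehension over range(len(seq) - m + 1) collecting ALL (overlapping) match positions
def pvHits (s p : List Char) : List Int :=
  (PySem.List.pyRange 0 ((s.length : Int) - p.length + 1) 1).filter
    (fun i => PySem.List.slice s (some i) (some (i + p.length)) = p)

-- stage 2 of Source B: the 'for i in hits' loop with the bound cursor
def pvSelect (m : Int) : List Int → Int → List Int
  | [], _ => []
  | i :: rest, bound =>
    if bound ≤ i then i :: pvSelect m rest (i + m) else pvSelect m rest bound

def count_without_overlaps_alt (seq : String) (sub : String) : List Int :=
  pvSelect (sub.toList.length : Int) (pvHits seq.toList sub.toList) 0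

-- ===== PRECONDITION & SPEC =====
-- Pre_ excludes sub = "": there Python A is a generator that yields 0 forever and never terminates.
def Pre_count_without_overlaps (_seq : String) (sub : String) : Prop := sub ≠ ""
instance (seq : String) (sub : String) : Decidable (Pre_count_without_overlaps seq sub) := by unfold Pre_count_without_overlaps; infer_instance
def pvWitness_count_without_overlaps : String × String := ("abcab", "ab")
def Spec_count_without_overlaps (seq : String) (sub : String) (out : List Int) : Prop := out = count_without_overlaps_alt seq sub
instance (seq : String) (sub : String) (out : List Int) : Decidable (Spec_count_without_overlaps seq sub out) := by unfold Spec_count_without_overlaps; infer_instance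

-- ===== CLAIM (what is proved, stated in full; the proofs are below) =====
def Claim_equal_count_without_overlaps : Prop := ∀ (seq : String) (sub : String), Dom_count_without_overlaps seq sub → Pre_count_without_overlaps seq sub → Spec_count_without_overlaps seq sub (count_without_overlaps seq sub)

-- ===== LEMMAS AND PROOFS =====

-- B's match test is the prefix test (inside the window)
lemma pvSlice_eq_iff (s p : List Char) (i m : Nat) (hm : m = p.length) (_hw : i + m ≤ s.length) :
    (PySem.List.slice s (some (i : Int)) (some ((i + m : Nat) : Int)) = p) ↔ p <+: s.drop i := by
  rw [PySem.List.slice_natCast]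
  have : i + m - i = m := by omega
  rw [this]
  constructor
  · intro h; exact ⟨(s.drop i).drop m, by rw [← h]; simp⟩
  · intro h
    have := List.prefix_iff_eq_take.mp h
    rw [this, ← hm]

lemma pvPrefix_drop_infix (s p : List Char) (i k : Nat) (hik : i ≤ k)
    (h : p <+: s.drop k) : p <:+: s.drop i := by
  have hdrop : s.drop k = (s.drop i).drop (k - i) := by
    rw [List.drop_drop]; congr 1; omega
  rw [hdrop] at h
  obtain ⟨t, ht⟩ := h
  obtain ⟨u, hu⟩ := List.drop_suffix (k - i) (s.drop i)
  exact ⟨u, t, by rw [← hu, ← ht, List.append_assoc]⟩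

-- membership in the stage-1 hit list
lemma pvMem_hits (s p : List Char) (j : Int) :
    j ∈ pvHits s p ↔ ∃ k : Nat, j = (k : Int) ∧ k + p.length ≤ s.length ∧ p <+: s.drop k := by
  unfold pvHits
  rw [List.mem_filter, PySem.List.mem_pyRange_one]
  constructor
  · rintro ⟨⟨h0, hlt⟩, hsl⟩
    refine ⟨j.toNat, (Int.toNat_of_nonneg h0).symm, by omega, ?_⟩
    have hj : j = ((j.toNat : Nat) : Int) := (Int.toNat_of_nonneg h0).symm
    have hw : j.toNat + p.length ≤ s.length := by omega
    rw [← pvSlice_eq_iff s p j.toNat p.length rfl hw]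
    have : ((j.toNat + p.length : Nat) : Int) = j + p.length := by push_cast; omega
    rw [this, ← hj]
    exact of_decide_eq_true hsl
  · rintro ⟨k, rfl, hle, hpre⟩
    refine ⟨⟨Int.natCast_nonneg k, by omega⟩, decide_eq_true ?_⟩
    have : ((k : Int) + p.length) = ((k + p.length : Nat) : Int) := by push_cast; ring
    rw [this]
    exact (pvSlice_eq_iff s p k p.length rfl hle).mpr hpre

lemma pvHits_sorted (s p : List Char) : (pvHits s p).Pairwise (· < ·) :=
  (PySem.List.pairwise_lt_pyRange_one _ _).filter _

-- the bound cursor at b dominates: filtering above any a ≤ b is the same as filtering above b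
lemma pvSelect_filter (m : Int) (hm : 0 ≤ m) :
    ∀ (l : List Int) (a b : Int), a ≤ b →
      pvSelect m (l.filter (fun j => decide (a ≤ j))) b
        = pvSelect m (l.filter (fun j => decide (b ≤ j))) b := by
  intro l
  induction l with
  | nil => intro a b _; rfl
  | cons j rest ih =>
    intro a b hab
    rw [List.filter_cons, List.filter_cons]
    by_cases hbj : b ≤ j
    · have haj : a ≤ j := le_trans hab hbj
      rw [if_pos (decide_eq_true haj), if_pos (decide_eq_true hbj)]
      simp only [pvSelect, if_pos hbj]
      rw [ih a (j + m) (by omega), ih b (j + m) (by omega)]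
    · by_cases haj : a ≤ j
      · rw [if_pos (decide_eq_true haj), if_neg (by simpa using hbj)]
        simp only [pvSelect, if_neg hbj]
        exact ih a b hab
      · rw [if_neg (by simpa using haj), if_neg (by simpa using hbj)]
        exact ih a b hab

-- splitting the filtered hit list at its first element
lemma pvFilter_split (l : List Int) (hsort : l.Pairwise (· < ·)) (f c : Int)
    (hf : f ∈ l) (hcf : c ≤ f) (hmin : ∀ j ∈ l, c ≤ j → f ≤ j) :
    l.filter (fun j => decide (c ≤ j)) = f :: l.filter (fun j => decide (f + 1 ≤ j)) := by
  induction l with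
  | nil => cases hf
  | cons j rest ih =>
    rcases List.pairwise_cons.mp hsort with ⟨hall, hsort'⟩
    rcases List.mem_cons.mp hf with rfl | hfr
    · have h1 : rest.filter (fun x => decide (c ≤ x)) = rest := by
        apply List.filter_eq_self.mpr
        intro x hx
        exact decide_eq_true (le_trans hcf (le_of_lt (hall x hx)))
      have h2 : rest.filter (fun x => decide (f + 1 ≤ x)) = rest := by
        apply List.filter_eq_self.mpr
        intro x hx
        have := hall x hx
        exact decide_eq_true (by omega)
      rw [List.filter_cons, List.filter_cons, if_pos (decide_eq_true hcf),
        if_neg (by simp), h1, h2]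
    · have hjf : j < f := hall f hfr
      have hjc : ¬ c ≤ j := fun hc => absurd (hmin j List.mem_cons_self hc) (by omega)
      rw [List.filter_cons, List.filter_cons, if_neg (by simpa using hjc),
        if_neg (by simp; omega)]
      exact ih hsort' hfr (fun x hx hcx => hmin x (List.mem_cons_of_mem _ hx) hcx)

-- main correspondence: A's find-jump loop equals B's greedy selection over the hit list
lemma pvMain (s p : List Char) (hp : p ≠ []) :
    ∀ (fuel c : Nat), c ≤ s.length → s.length + 1 ≤ fuel + c →
      pvGoA s p c fuel
        = pvSelect (p.length : Int) ((pvHits s p).filter (fun j => decide ((c : Int) ≤ j))) (c : Int) := by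
  intro fuel
  induction fuel with
  | zero => intro c hc h1; omega
  | succ fu ih =>
    intro c hc h1
    have hplen : 1 ≤ p.length := List.length_pos_iff.mpr hp
    by_cases hf : PySem.Chars.findFrom s p (c : Int) none = -1
    · have hninf : ¬ (p <:+: s.drop c) :=
        (PySem.Chars.findFrom_natCast_eq_neg_one_iff s p c hc).mp hf
      have hnil : (pvHits s p).filter (fun j => decide ((c : Int) ≤ j)) = [] := by
        apply List.filter_eq_nil_iff.mpr
        intro j hj
        rcases (pvMem_hits s p j).mp hj with ⟨k, rfl, _, hpre⟩
        simp only [decide_eq_true_eq]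
        intro hcj
        exact hninf (pvPrefix_drop_infix s p c k (by exact_mod_cast hcj) hpre)
      simp only [pvGoA, hf, if_true, hnil, pvSelect]
    · obtain ⟨hle, hpre, hmin⟩ := PySem.Chars.findFrom_natCast_spec s p c hc hf
      set f := PySem.Chars.findFrom s p (c : Int) none with hfdef
      have hf0 : 0 ≤ f := le_trans (by exact_mod_cast Int.natCast_nonneg c) hle
      have hfit : p.length ≤ (s.drop f.toNat).length := hpre.length_le
      have hfn : f.toNat + p.length ≤ s.length := by
        simp [List.length_drop] at hfit; omega
      have hfmem : f ∈ pvHits s p := by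
        rw [pvMem_hits]
        exact ⟨f.toNat, (Int.toNat_of_nonneg hf0).symm, hfn, hpre⟩
      have hminl : ∀ j ∈ pvHits s p, (c : Int) ≤ j → f ≤ j := by
        intro j hj hcj
        rcases (pvMem_hits s p j).mp hj with ⟨k, rfl, _, hpk⟩
        by_contra hlt
        exact hmin k (by exact_mod_cast hcj) (by omega) hpk
      rw [pvFilter_split _ (pvHits_sorted s p) f _ hfmem hle hminl]
      simp only [pvGoA]
      rw [← hfdef, if_neg hf]
      simp only [pvSelect, if_pos hle]
      congr 1
      have hcast : f + (p.length : Int) = ((f.toNat + p.length : Nat) : Int) := by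
        push_cast; omega
      rw [hcast, pvSelect_filter (p.length : Int) (Int.natCast_nonneg p.length) _ (f + 1)
        ((f.toNat + p.length : Nat) : Int) (by push_cast; omega)]
      exact ih (f.toNat + p.length) hfn (by omega)

-- ===== VERDICT (by name: the statement is the Claim_ definition above) =====
theorem count_without_overlaps_spec : Claim_equal_count_without_overlaps := by
  intro seq sub _ hpre
  unfold Spec_count_without_overlaps count_without_overlaps count_without_overlaps_alt
  have hp : sub.toList ≠ [] := by
    intro h
    exact hpre (String.toList_inj.mp (by simp [h]))
  have h0 : (pvHits seq.toList sub.toList).filter (fun j => decide ((0 : Int) ≤ j))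
      = pvHits seq.toList sub.toList := by
    apply List.filter_eq_self.mpr
    intro j hj
    rcases (pvMem_hits _ _ j).mp hj with ⟨k, rfl, _, _⟩
    exact decide_eq_true (Int.natCast_nonneg k)
  have := pvMain seq.toList sub.toList hp (seq.toList.length + 1) 0 (by omega) (by omega)
  simpa [h0] using this
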